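-- pv_equiv track=rewrite | github.com/Preet101104/Daily_Work_Automation | bot.py | sanitize_for_xml
-- ===== SOURCE A (Python) =====
-- def sanitize_for_xml(value):
--     """Recursively sanitize strings in dicts/lists to be XML-safe."""
--     if isinstance(value, str):
--         return (
--             value
--             .replace("&", "and")   # must be first
--             .replace("<", "(")
--             .replace(">", ")")
--             .replace('"', "'")
--         )
--     elif isinstance(value, list):
--         return [sanitize_for_xml(v) for v in value]
--     elif isinstance(value, dict):
--         return {k: sanitize_for_xml(v) for k, v in value.items()}
--     return value
-- ===== SOURCE B (Python) =====
-- _XML_MAP = {'&': 'and', '<': '(', '>': ')', '"': "'"}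
--
-- def sanitize_for_xml(value):
--     """Recursively sanitize strings in dicts/lists to be XML-safe."""
--     if isinstance(value, str):
--         return ''.join(_XML_MAP.get(c, c) for c in value)
--     elif isinstance(value, list):
--         return [sanitize_for_xml(v) for v in value]
--     elif isinstance(value, dict):
--         return {k: sanitize_for_xml(v) for k, v in value.items()}
--     return value
-- ===== Notes on version B (the rewrite author's own statement) =====
-- stated objective: idiomatic
-- what changed: replaces four chained whole-string .replace passes by a single left-to-right character pass joining lookups in a substitution table; equivalent because no replacement text contains a source character
import Mathlib
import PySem

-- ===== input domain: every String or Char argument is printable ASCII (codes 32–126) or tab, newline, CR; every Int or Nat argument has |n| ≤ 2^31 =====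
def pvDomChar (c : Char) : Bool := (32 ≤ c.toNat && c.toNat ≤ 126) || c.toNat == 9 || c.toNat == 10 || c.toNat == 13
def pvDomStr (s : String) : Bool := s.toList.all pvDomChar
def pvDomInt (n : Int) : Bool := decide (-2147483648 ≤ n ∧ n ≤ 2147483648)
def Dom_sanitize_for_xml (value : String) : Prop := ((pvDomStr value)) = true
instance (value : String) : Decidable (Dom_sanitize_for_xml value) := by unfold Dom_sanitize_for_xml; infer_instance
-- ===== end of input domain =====

-- B replaces four chained whole-string .replace passes by one left-to-right character pass
-- over a substitution table (idiomatic single pass; same result since no replacement text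
-- contains a source character).

-- ===== PORT A =====
def sanitize_for_xml (value : String) : String :=
  PySem.Str.replace
    (PySem.Str.replace
      (PySem.Str.replace
        (PySem.Str.replace value "&" "and")
        "<" "(")
      ">" ")")
    "\"" "'"

-- ===== PORT B =====
def xmlMapping : PySem.Dict Char String :=
  PySem.Dict.ofList [('&', "and"), ('<', "("), ('>', ")"), ('"', "'")]

def sanitize_for_xml_alt (value : String) : String :=
  PySem.Str.join "" (value.toList.map (fun c => PySem.Dict.getD xmlMapping c (String.ofList [c])))

-- ===== PRECONDITION & SPEC =====
def Spec_sanitize_for_xml (value : String) (out : String) : Prop := out = sanitize_for_xml_alt value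
instance (value : String) (out : String) : Decidable (Spec_sanitize_for_xml value out) := by unfold Spec_sanitize_for_xml; infer_instance

-- ===== CLAIM (what is proved, stated in full; the proofs are below) =====
def Claim_equal_sanitize_for_xml : Prop := ∀ (value : String), Dom_sanitize_for_xml value → Spec_sanitize_for_xml value (sanitize_for_xml value)

-- ===== LEMMAS AND PROOFS =====

-- single-character `replace` is a per-character flatMap
theorem replace_go_single (o : Char) (new : List Char) :
    ∀ (l : List Char) (fuel : Nat) (acc : List Char), l.length ≤ fuel →
      PySem.Chars.replace.go [o] new fuel l acc
        = acc.reverse ++ l.flatMap (fun c => if c = o then new else [c]) := by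
  intro l
  induction l with
  | nil =>
    intro fuel acc _
    cases fuel <;> simp [PySem.Chars.replace.go]
  | cons c t ih =>
    intro fuel acc h
    cases fuel with
    | zero => simp at h
    | succ f =>
      by_cases hc : c = o
      · subst hc
        have hpre : List.isPrefixOf [c] (c :: t) = true := by simp [List.isPrefixOf]
        simp only [PySem.Chars.replace.go, hpre, if_true, List.length_nil, Nat.zero_add,
          List.drop_succ_cons, List.drop_zero, List.length_cons] at *
        rw [ih f (new.reverse ++ acc) (by omega)]
        simp
      · have hpre : List.isPrefixOf [o] (c :: t) = false := by
          simp [List.isPrefixOf]; exact fun h' => (hc h'.symm).elim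
        simp only [PySem.Chars.replace.go, hpre, List.length_cons] at *
        rw [ih f (c :: acc) (by omega)]
        simp [hc]

theorem replace_single (o : Char) (new s : List Char) :
    PySem.Chars.replace s [o] new = s.flatMap (fun c => if c = o then new else [c]) := by
  rw [PySem.Chars.replace]
  rw [if_neg (by simp)]
  simpa using replace_go_single o new s s.length [] le_rfl

theorem join_empty_flatten (ls : List (List Char)) : PySem.Chars.join [] ls = ls.flatten := by
  simp only [PySem.Chars.join]
  induction ls with
  | nil => rfl
  | cons h t ih => simp [List.intercalate] at *; cases t <;> simp_all [List.intersperse]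

-- the composed per-character action of A's four replaces equals B's table lookup
theorem char_step (c : Char) :
    (if c = '&' then "and".toList else [c]).flatMap (fun b =>
      (if b = '<' then "(".toList else [b]).flatMap (fun d =>
        (if d = '>' then ")".toList else [d]).flatMap (fun e =>
          if e = '"' then "'".toList else [e])))
      = (PySem.Dict.getD xmlMapping c (String.ofList [c])).toList := by
  by_cases h1 : c = '&'
  · subst h1; decide
  · by_cases h2 : c = '<'
    · subst h2; decide
    · by_cases h3 : c = '>'
      · subst h3; decide
      · by_cases h4 : c = '"'
        · subst h4; decide
        · have hitems : xmlMapping.items = [('&', "and"), ('<', "("), ('>', ")"), ('"', "'")] := by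
            decide
          have b2 : ('<' == c) = false := beq_eq_false_iff_ne.mpr (Ne.symm h2)
          have b3 : ('>' == c) = false := beq_eq_false_iff_ne.mpr (Ne.symm h3)
          have b4 : ('"' == c) = false := beq_eq_false_iff_ne.mpr (Ne.symm h4)
          simp [h1, h2, h3, h4, PySem.Dict.getD, PySem.Dict.get?, hitems, List.find?,
            Ne.symm h1, b2, b3, b4]

-- ===== VERDICT (by name: the statement is the Claim_ definition above) =====
theorem sanitize_for_xml_spec : Claim_equal_sanitize_for_xml := by
  intro value _
  show sanitize_for_xml value = sanitize_for_xml_alt value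
  have h : (sanitize_for_xml value).toList = (sanitize_for_xml_alt value).toList := by
    simp only [sanitize_for_xml, sanitize_for_xml_alt, PySem.Str.toList_replace,
      PySem.Str.toList_join, List.map_map]
    rw [show ("&" : String).toList = ['&'] from rfl, show ("<" : String).toList = ['<'] from rfl,
       show (">" : String).toList = ['>'] from rfl, show ("\"" : String).toList = ['"'] from rfl,
       show ("" : String).toList = ([] : List Char) from rfl]
    rw [replace_single, replace_single, replace_single, replace_single, join_empty_flatten]
    rw [List.flatMap_assoc, List.flatMap_assoc, List.flatMap_assoc]
    simp only [char_step, Function.comp_def]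
    rw [List.flatMap]
  simpa using congrArg String.ofList h
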